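-- pv_equiv track=rewrite | github.com/OscarMcG-dev/sales_data_tools | scraper/segment_mapper.py | map_areas_to_segment
-- ===== SOURCE A (Python) =====
-- from typing import List, Optional
--
-- TAX_INDICATOR = "Tax Planning and Returns"
--
-- BOOKKEEPING_INDICATOR = "Bookkeeping"
--
-- SEGMENT_GENERAL = "General Accounting (Including Tax)"
--
-- SEGMENT_BOOKKEEPING = "Bookkeeping (No Income Tax)"
--
-- SEGMENT_OTHER_ACCOUNTING = "Other Accounting (No Tax)"
--
-- def map_areas_to_segment(areas: List[str]) -> str:
--     """Map a list of 'Areas of Accountancy' strings to a single Attio segment."""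
--     if not areas:
--         return SEGMENT_GENERAL
--
--     normalized = {a.strip() for a in areas if a.strip()}
--
--     if TAX_INDICATOR in normalized:
--         return SEGMENT_GENERAL
--
--     if BOOKKEEPING_INDICATOR in normalized:
--         return SEGMENT_BOOKKEEPING
--
--     if normalized:
--         return SEGMENT_OTHER_ACCOUNTING
--
--     return SEGMENT_GENERAL
-- ===== SOURCE B (Python) =====
-- TAX_INDICATOR = "Tax Planning and Returns"
-- BOOKKEEPING_INDICATOR = "Bookkeeping"
-- SEGMENT_GENERAL = "General Accounting (Including Tax)"
-- SEGMENT_BOOKKEEPING = "Bookkeeping (No Income Tax)"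
-- SEGMENT_OTHER_ACCOUNTING = "Other Accounting (No Tax)"
--
-- def _rank(a):
--     """Priority of one area string: empty 0 < other 1 < bookkeeping 2 < tax 3."""
--     s = a.strip()
--     if not s:
--         return 0
--     if s == TAX_INDICATOR:
--         return 3
--     if s == BOOKKEEPING_INDICATOR:
--         return 2
--     return 1
--
-- _TABLE = (SEGMENT_GENERAL, SEGMENT_OTHER_ACCOUNTING, SEGMENT_BOOKKEEPING, SEGMENT_GENERAL)
--
-- def map_areas_to_segment(areas):
--     """Map a list of 'Areas of Accountancy' strings to a single Attio segment."""
--     if not areas: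
--         return SEGMENT_GENERAL
--     return _TABLE[max(map(_rank, areas))]
-- ===== Notes on version B (the rewrite author's own statement) =====
-- stated objective: alternative
-- what changed: Replaces the set comprehension and cascaded membership tests by a numeric priority: each area is mapped to a rank (empty 0 < other 1 < bookkeeping 2 < tax 3), the maximum rank is taken, and the answer is read from a lookup table indexed by that maximum.
import Mathlib
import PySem

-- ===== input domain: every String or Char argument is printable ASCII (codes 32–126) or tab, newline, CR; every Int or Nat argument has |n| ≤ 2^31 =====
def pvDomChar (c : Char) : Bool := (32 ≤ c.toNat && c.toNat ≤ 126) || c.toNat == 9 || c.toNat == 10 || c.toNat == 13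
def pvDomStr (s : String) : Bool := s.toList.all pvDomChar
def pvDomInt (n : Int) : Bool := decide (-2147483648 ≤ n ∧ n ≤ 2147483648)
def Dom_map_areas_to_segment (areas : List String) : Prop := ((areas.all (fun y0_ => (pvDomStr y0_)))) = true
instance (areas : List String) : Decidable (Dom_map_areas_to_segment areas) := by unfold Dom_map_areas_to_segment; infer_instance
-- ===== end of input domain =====

-- B replaces A's set comprehension + cascaded membership tests by a per-element numeric
-- priority rank, a single max, and a table lookup (alternative decomposition, same cost).

def pvTAX : String := "Tax Planning and Returns"
def pvBOOK : String := "Bookkeeping"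
def pvSEG_GENERAL : String := "General Accounting (Including Tax)"
def pvSEG_BOOKKEEPING : String := "Bookkeeping (No Income Tax)"
def pvSEG_OTHER : String := "Other Accounting (No Tax)"

-- ===== PORT A =====
def map_areas_to_segment (areas : List String) : String :=
  if areas = [] then pvSEG_GENERAL
  else
    let normalized : PySem.Set String :=
      PySem.Set.ofList ((areas.filter (fun a => PySem.Str.strip a ≠ "")).map PySem.Str.strip)
    if PySem.Set.contains normalized pvTAX then pvSEG_GENERAL
    else if PySem.Set.contains normalized pvBOOK then pvSEG_BOOKKEEPING
    else if normalized ≠ [] then pvSEG_OTHER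
    else pvSEG_GENERAL

-- ===== PORT B =====
def pvRank (a : String) : Int :=
  let s := PySem.Str.strip a
  if s = "" then 0
  else if s = pvTAX then 3
  else if s = pvBOOK then 2
  else 1

def pvTable : List String := [pvSEG_GENERAL, pvSEG_OTHER, pvSEG_BOOKKEEPING, pvSEG_GENERAL]

def map_areas_to_segment_alt (areas : List String) : String :=
  if areas = [] then pvSEG_GENERAL
  else
    match areas.map pvRank with
    | [] => pvSEG_GENERAL  -- unreachable: areas ≠ []
    -- max of a nonempty list = first element folded with max; table[m] via pyGet?
    -- (the none branch is unreachable: every rank is in 0..3)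
    | r :: rs => (PySem.List.pyGet? pvTable (rs.foldl max r)).getD pvSEG_GENERAL

-- ===== PRECONDITION & SPEC =====
def Spec_map_areas_to_segment (areas : List String) (out : String) : Prop := out = map_areas_to_segment_alt areas
instance (areas : List String) (out : String) : Decidable (Spec_map_areas_to_segment areas out) := by unfold Spec_map_areas_to_segment; infer_instance

-- ===== CLAIM (what is proved, stated in full; the proofs are below) =====
def Claim_equal_map_areas_to_segment : Prop := ∀ (areas : List String), Dom_map_areas_to_segment areas → Spec_map_areas_to_segment areas (map_areas_to_segment areas)

-- ===== LEMMAS AND PROOFS =====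

/-- The "supremum rank" of a list, written through A's three conditions. -/
def pvSup (l : List String) : Int :=
  if l.any (fun a => PySem.Str.strip a = pvTAX) then 3
  else if l.any (fun a => PySem.Str.strip a = pvBOOK) then 2
  else if l.any (fun a => PySem.Str.strip a ≠ "") then 1
  else 0

theorem pvSup_bounds (l : List String) : 0 ≤ pvSup l ∧ pvSup l ≤ 3 := by
  unfold pvSup; split_ifs <;> omega

theorem pvSup_cons (a : String) (t : List String) :
    pvSup (a :: t) = max (pvRank a) (pvSup t) := by
  have hb := pvSup_bounds t
  have dT : pvTAX ≠ "" := by decide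
  have dB : pvBOOK ≠ "" := by decide
  have dTB : pvTAX ≠ pvBOOK := by decide
  unfold pvSup pvRank at *
  by_cases h1 : PySem.Str.strip a = pvTAX
  · simp only [List.any_cons, h1]
    simp [dT]
    split_ifs at * <;> omega
  · by_cases h2 : PySem.Str.strip a = pvBOOK
    · simp only [List.any_cons, h2]
      simp [dB, Ne.symm dTB]
      split_ifs at * <;> omega
    · by_cases h3 : PySem.Str.strip a = ""
      · simp only [List.any_cons, h3]
        simp [Ne.symm dT, Ne.symm dB]
        split_ifs at * <;> omega
      · simp only [List.any_cons]
        simp [h1, h2, h3]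
        split_ifs at * <;> omega

theorem pvFoldMax (l : List String) (st : Int) (hst : 0 ≤ st) :
    (l.map pvRank).foldl max st = max st (pvSup l) := by
  induction l generalizing st with
  | nil => simp [pvSup]; omega
  | cons a t ih =>
    have hr : 0 ≤ pvRank a := by simp only [pvRank]; split_ifs <;> omega
    simp only [List.map_cons, List.foldl_cons]
    rw [ih (max st (pvRank a)) (le_trans hst (le_max_left _ _)), pvSup_cons]
    omega

theorem pvRank_nonneg (a : String) : 0 ≤ pvRank a := by
  simp only [pvRank]; split_ifs <;> omega

theorem pvMemNormalized (areas : List String) (x : String) (hx : x ≠ "") :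
    (x ∈ (areas.filter (fun a => PySem.Str.strip a ≠ "")).map PySem.Str.strip) ↔
      areas.any (fun a => PySem.Str.strip a = x) = true := by
  simp only [List.mem_map, List.mem_filter, List.any_eq_true, decide_eq_true_eq]
  constructor
  · rintro ⟨a, ⟨ha, _⟩, rfl⟩; exact ⟨a, ha, rfl⟩
  · rintro ⟨a, ha, h⟩; exact ⟨a, ⟨ha, by simp [h, hx]⟩, h⟩

theorem pvNormEmpty (areas : List String) :
    ((areas.filter (fun a => PySem.Str.strip a ≠ "")).map PySem.Str.strip = []) ↔
      areas.any (fun a => PySem.Str.strip a ≠ "") = false := by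
  simp only [List.map_eq_nil_iff, List.filter_eq_nil_iff, List.any_eq_false,
    decide_eq_true_eq, not_not]

theorem pvOfListNil (L : List String) :
    PySem.Set.ofList L = [] ↔ L = [] := by
  cases L with
  | nil => simp [PySem.Set.ofList]
  | cons a t =>
    simp only [List.cons_ne_nil, iff_false]
    intro h
    have ha : a ∈ PySem.Set.ofList (a :: t) := (PySem.Set.mem_ofList _ _).2 (by simp)
    rw [h] at ha
    simp at ha

theorem pvAltSup (areas : List String) (hnil : areas ≠ []) :
    map_areas_to_segment_alt areas
      = (PySem.List.pyGet? pvTable (pvSup areas)).getD pvSEG_GENERAL := by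
  unfold map_areas_to_segment_alt
  cases areas with
  | nil => exact absurd rfl hnil
  | cons a t =>
    simp only [List.cons_ne_nil, if_false, List.map_cons]
    rw [pvFoldMax t (pvRank a) (pvRank_nonneg a), ← pvSup_cons]

-- ===== VERDICT (by name: the statement is the Claim_ definition above) =====
theorem map_areas_to_segment_spec : Claim_equal_map_areas_to_segment := by
  intro areas _
  unfold Spec_map_areas_to_segment
  by_cases hnil : areas = []
  · simp [hnil, map_areas_to_segment, map_areas_to_segment_alt]
  · rw [pvAltSup areas hnil]
    unfold map_areas_to_segment
    simp only [hnil, if_false]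
    set L := (areas.filter (fun a => PySem.Str.strip a ≠ "")).map PySem.Str.strip with hL
    have cT : (PySem.Set.ofList L).contains pvTAX
        = areas.any (fun a => PySem.Str.strip a = pvTAX) := by
      rw [Bool.eq_iff_iff, PySem.Set.contains_iff, PySem.Set.mem_ofList, hL,
        pvMemNormalized _ _ (by decide)]
    have cB : (PySem.Set.ofList L).contains pvBOOK
        = areas.any (fun a => PySem.Str.strip a = pvBOOK) := by
      rw [Bool.eq_iff_iff, PySem.Set.contains_iff, PySem.Set.mem_ofList, hL,
        pvMemNormalized _ _ (by decide)]
    rw [cT, cB]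
    by_cases htax : (areas.any fun a => decide (PySem.Str.strip a = pvTAX)) = true
    · have hsup : pvSup areas = 3 := by unfold pvSup; simp [htax]
      simp only [htax, if_true, hsup]
      decide
    · by_cases hbook : (areas.any fun a => decide (PySem.Str.strip a = pvBOOK)) = true
      · have hsup : pvSup areas = 2 := by unfold pvSup; simp [htax, hbook]
        simp only [htax, hbook, if_true, if_false, Bool.false_eq_true, hsup]
        decide
      · by_cases hany : (areas.any fun a => decide (PySem.Str.strip a ≠ "")) = true
        · have hsup : pvSup areas = 1 := by
            have htax' := Bool.not_eq_true _ |>.mp htax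
            have hbook' := Bool.not_eq_true _ |>.mp hbook
            unfold pvSup
            simp only [htax', hbook', hany, Bool.false_eq_true, if_false, if_true]
          have hne : PySem.Set.ofList L ≠ [] := by
            rw [Ne, pvOfListNil, hL, pvNormEmpty]
            intro hf; rw [hf] at hany; exact Bool.noConfusion hany
          simp only [htax, hbook, if_false, Bool.false_eq_true, hne, ne_eq,
            not_false_iff, if_true, hsup]
          decide
        · have hsup : pvSup areas = 0 := by
            have htax' := Bool.not_eq_true _ |>.mp htax
            have hbook' := Bool.not_eq_true _ |>.mp hbook
            have hany' := Bool.not_eq_true _ |>.mp hany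
            unfold pvSup
            simp only [htax', hbook', hany', Bool.false_eq_true, if_false]
          have he : PySem.Set.ofList L = [] := by
            rw [pvOfListNil, hL, pvNormEmpty]
            simpa using hany
          simp only [htax, hbook, if_false, Bool.false_eq_true, he, ne_eq,
            not_true, hsup]
          decide
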